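-- pv_equiv track=rewrite | github.com/ShotDownDiane/verl-agent-co | agent_system/environments/format_reward.py | check_cvrp_route_feasibility
-- ===== SOURCE A (Python) =====
-- from typing import List, Dict, Any, Optional, Tuple
--
-- def check_cvrp_route_feasibility(
--     routes: List[List[int]],
--     num_nodes: int,
--     depot: int = 0,
-- ) -> bool:
--     """Check if CVRP routes are feasible.
--
--     A feasible CVRP solution should:
--     - Each route starts and ends at depot
--     - All customer nodes are visited exactly once
--     - All node indices are valid
--
--     Args:
--         routes: List of routes, each route is a list of node indices
--         num_nodes: Total number of nodes (including depot)
--         depot: Depot node index (default: 0)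
--
--     Returns:
--         True if routes are feasible, False otherwise
--     """
--     if not routes:
--         return False
--
--     visited_nodes = set()
--
--     for route in routes:
--         if not route:
--             continue
--
--         # Check if route starts and ends at depot
--         if route[0] != depot or route[-1] != depot:
--             return False
--
--         # Check if all indices are valid
--         if any(idx < 0 or idx >= num_nodes for idx in route):
--             return False
--
--         # Collect customer nodes (excluding depot)
--         customer_nodes = [n for n in route if n != depot]
--
--         # Check for duplicates within route
--         if len(customer_nodes) != len(set(customer_nodes)):
--             return False
--
--         # Check for duplicates across routes
--         for node in customer_nodes:
--             if node in visited_nodes: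
--                 return False
--             visited_nodes.add(node)
--
--     # Check if all customer nodes are visited (depot is node 0)
--     expected_customers = set(range(1, num_nodes))
--     if visited_nodes != expected_customers:
--         return False
--
--     return True
-- ===== SOURCE B (Python) =====
-- def check_cvrp_route_feasibility(routes, num_nodes, depot=0):
--     nonempty = [r for r in routes if r]
--     return (bool(routes)
--             and all(r[0] == depot and r[-1] == depot for r in nonempty)
--             and all(0 <= n < num_nodes for r in nonempty for n in r)
--             and sorted(n for r in nonempty for n in r if n != depot)
--                 == list(range(1, num_nodes)))
-- ===== Notes on version B (the rewrite author's own statement) =====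
-- stated objective: simpler
-- what changed: Replaces the stateful early-return loop with incremental visited-set and per-route duplicate checks by a declarative conjunction: after structural checks on the non-empty routes, feasibility is decided by sorting the flat list of non-depot nodes and comparing it to list(range(1, num_nodes)), which enforces exactly-once coverage in one equality.
import Mathlib
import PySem

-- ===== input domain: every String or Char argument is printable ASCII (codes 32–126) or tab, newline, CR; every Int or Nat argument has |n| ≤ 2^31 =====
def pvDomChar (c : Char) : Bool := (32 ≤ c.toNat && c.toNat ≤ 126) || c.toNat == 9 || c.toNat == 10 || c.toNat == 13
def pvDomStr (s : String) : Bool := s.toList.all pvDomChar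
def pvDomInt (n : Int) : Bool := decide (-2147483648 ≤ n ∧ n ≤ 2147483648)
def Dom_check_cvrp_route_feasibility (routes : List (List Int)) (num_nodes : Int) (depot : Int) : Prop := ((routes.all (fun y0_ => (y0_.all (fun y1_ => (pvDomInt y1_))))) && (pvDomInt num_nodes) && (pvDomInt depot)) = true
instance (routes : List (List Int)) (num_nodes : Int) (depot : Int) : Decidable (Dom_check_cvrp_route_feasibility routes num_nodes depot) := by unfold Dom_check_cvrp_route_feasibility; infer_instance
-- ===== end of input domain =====

-- B replaces A's stateful loop (incremental visited set, per-route duplicate checks, early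
-- returns) by a declarative conjunction: structural checks over the non-empty routes, then
-- sorted(non-depot nodes) == list(range(1, num_nodes)). Objective: simpler.

-- ===== PORT A =====
-- the 'for node in customer_nodes: if node in visited_nodes: return False; visited_nodes.add(node)' loop
def pvInnerLoop : List Int → PySem.Set Int → Option (PySem.Set Int)
  | [], visited => some visited
  | node :: rest, visited =>
    if PySem.Set.contains visited node then none
    else pvInnerLoop rest (PySem.Set.add visited node)

-- the 'for route in routes' loop; none = an early 'return False'
def pvALoop (num_nodes depot : Int) : List (List Int) → PySem.Set Int → Option (PySem.Set Int)
  | [], visited => some visited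
  | route :: rest, visited =>
    if route = [] then pvALoop num_nodes depot rest visited
    else if PySem.List.pyGetD route 0 0 ≠ depot ∨ PySem.List.pyGetD route (-1) 0 ≠ depot then none
    else if route.any (fun idx => decide (idx < 0) || decide (num_nodes ≤ idx)) then none
    else
      let customer_nodes := route.filter (fun n => decide (n ≠ depot))
      if customer_nodes.length ≠ PySem.Set.len (PySem.Set.ofList customer_nodes) then none
      else match pvInnerLoop customer_nodes visited with
           | none => none
           | some v => pvALoop num_nodes depot rest v

def check_cvrp_route_feasibility (routes : List (List Int)) (num_nodes : Int) (depot : Int) : Bool :=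
  if routes = [] then false
  else match pvALoop num_nodes depot routes PySem.Set.empty with
    | none => false
    | some visited =>
      let expected_customers := PySem.Set.ofList (PySem.List.pyRange 1 num_nodes 1)
      if !(PySem.Set.equal visited expected_customers) then false else true

-- ===== PORT B =====
def check_cvrp_route_feasibility_alt (routes : List (List Int)) (num_nodes : Int) (depot : Int) : Bool :=
  let nonempty := routes.filter (fun r => decide (r ≠ []))
  decide (routes ≠ []) &&
  nonempty.all (fun r => (PySem.List.pyGetD r 0 0 == depot) && (PySem.List.pyGetD r (-1) 0 == depot)) &&
  nonempty.all (fun r => r.all (fun n => decide (0 ≤ n) && decide (n < num_nodes))) &&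
  (PySem.List.sorted (nonempty.flatMap (fun r => r.filter (fun n => decide (n ≠ depot)))) (fun x => x) false
    == PySem.List.pyRange 1 num_nodes 1)

-- ===== PRECONDITION & SPEC =====
def Spec_check_cvrp_route_feasibility (routes : List (List Int)) (num_nodes : Int) (depot : Int) (out : Bool) : Prop := out = check_cvrp_route_feasibility_alt routes num_nodes depot
instance (routes : List (List Int)) (num_nodes : Int) (depot : Int) (out : Bool) : Decidable (Spec_check_cvrp_route_feasibility routes num_nodes depot out) := by unfold Spec_check_cvrp_route_feasibility; infer_instance

-- ===== CLAIM =====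
def Claim_equal_check_cvrp_route_feasibility : Prop := ∀ (routes : List (List Int)) (num_nodes : Int) (depot : Int), Dom_check_cvrp_route_feasibility routes num_nodes depot → Spec_check_cvrp_route_feasibility routes num_nodes depot (check_cvrp_route_feasibility routes num_nodes depot)

-- ===== LEMMAS AND PROOFS =====

-- proof-side middle form: A's loop with the set bookkeeping stripped to a flat customer list
def pvMidLoop (num_nodes depot : Int) : List (List Int) → List Int → Option (List Int)
  | [], customers => some customers
  | route :: rest, customers =>
    if route = [] then pvMidLoop num_nodes depot rest customers
    else if PySem.List.pyGetD route 0 0 ≠ depot ∨ PySem.List.pyGetD route (-1) 0 ≠ depot then none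
    else if route.any (fun idx => decide (idx < 0) || decide (num_nodes ≤ idx)) then none
    else pvMidLoop num_nodes depot rest (customers ++ route.filter (fun n => decide (n ≠ depot)))

def pvAFin (num_nodes : Int) : Option (PySem.Set Int) → Bool
  | none => false
  | some visited =>
    if !(PySem.Set.equal visited (PySem.Set.ofList (PySem.List.pyRange 1 num_nodes 1))) then false else true

def pvMidFin (num_nodes : Int) : Option (List Int) → Bool
  | none => false
  | some customers =>
    (customers.length == PySem.Set.len (PySem.Set.ofList (PySem.List.pyRange 1 num_nodes 1))) &&
      PySem.Set.equal (PySem.Set.ofList customers) (PySem.Set.ofList (PySem.List.pyRange 1 num_nodes 1))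

theorem pv_length_ofList_eq_iff_nodup {l : List Int} :
    (PySem.Set.ofList l).length = l.length ↔ l.Nodup := by
  constructor
  · intro h
    have hperm : (PySem.Set.ofList l).Perm l.dedup :=
      (List.perm_ext_iff_of_nodup (PySem.Set.nodup_ofList l) (List.nodup_dedup l)).2
        (fun a => by rw [PySem.Set.mem_ofList, List.mem_dedup])
    have hlen : l.dedup.length = l.length := by rw [← hperm.length_eq, h]
    have hd := (List.dedup_sublist l).eq_of_length hlen
    rw [← hd]; exact List.nodup_dedup l
  · intro h; rw [PySem.Set.ofList_eq_self_of_nodup l h]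

theorem pv_midFin_not_nodup {num_nodes : Int} {cs : List Int} (h : ¬ cs.Nodup) :
    pvMidFin num_nodes (some cs) = false := by
  by_cases he : PySem.Set.equal (PySem.Set.ofList cs)
      (PySem.Set.ofList (PySem.List.pyRange 1 num_nodes 1)) = true
  · have hperm :=
      (List.perm_ext_iff_of_nodup (PySem.Set.nodup_ofList cs) (PySem.Set.nodup_ofList _)).2
        (fun a => ((PySem.Set.equal_iff _ _).1 he) a)
    have hne : ((cs.length : Int) == PySem.Set.len (PySem.Set.ofList (PySem.List.pyRange 1 num_nodes 1))) = false := by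
      rw [beq_eq_false_iff_ne]
      intro hlen
      apply h
      apply pv_length_ofList_eq_iff_nodup.1
      rw [hperm.length_eq]
      simp only [PySem.Set.len] at hlen
      omega
    simp only [pvMidFin, hne, Bool.false_and]
  · simp only [pvMidFin, eq_false_of_ne_true he, Bool.and_false]

theorem pv_midLoop_not_nodup (num_nodes depot : Int) :
    ∀ (rs : List (List Int)) (cs : List Int), ¬ cs.Nodup →
      pvMidFin num_nodes (pvMidLoop num_nodes depot rs cs) = false := by
  intro rs
  induction rs with
  | nil => intro cs h; exact pv_midFin_not_nodup h
  | cons r rest ih =>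
    intro cs h
    simp only [pvMidLoop]
    split_ifs with h1 h2 h3
    · exact ih cs h
    · rfl
    · rfl
    · exact ih _ (fun hn => h (hn.sublist (List.sublist_append_left cs _)))

theorem pv_innerLoop_eq :
    ∀ (ns : List Int) (v : PySem.Set Int), ns.Nodup →
      pvInnerLoop ns v =
        if ∃ m ∈ ns, m ∈ v then none else some (ns.foldl PySem.Set.add v) := by
  intro ns
  induction ns with
  | nil => intro v _; simp [pvInnerLoop]
  | cons n rest ih =>
    intro v hnd
    obtain ⟨hn, hrestnd⟩ := List.nodup_cons.1 hnd
    simp only [pvInnerLoop]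
    by_cases hc : n ∈ v
    · rw [if_pos ((PySem.Set.contains_iff v n).2 hc),
        if_pos ⟨n, List.mem_cons_self, hc⟩]
    · rw [if_neg (fun hh => hc ((PySem.Set.contains_iff v n).1 hh)), ih _ hrestnd]
      have hiff : (∃ m ∈ rest, m ∈ PySem.Set.add v n) ↔ (∃ m ∈ n :: rest, m ∈ v) := by
        constructor
        · rintro ⟨m, hm, hmv⟩
          rcases (PySem.Set.mem_add v n m).1 hmv with h' | h'
          · exact ⟨m, List.mem_cons_of_mem _ hm, h'⟩
          · exact absurd (h' ▸ hm) hn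
        · rintro ⟨m, hm, hmv⟩
          rcases List.mem_cons.1 hm with h' | h'
          · exact absurd (h' ▸ hmv) hc
          · exact ⟨m, h', (PySem.Set.mem_add v n m).2 (Or.inl hmv)⟩
      by_cases hr : ∃ m ∈ rest, m ∈ PySem.Set.add v n
      · rw [if_pos hr, if_pos (hiff.1 hr)]
      · rw [if_neg hr, if_neg (fun hh => hr (hiff.2 hh)), List.foldl_cons]

theorem pv_foldl_add_ofList (cs ks : List Int) :
    ks.foldl PySem.Set.add (PySem.Set.ofList cs) = PySem.Set.ofList (cs ++ ks) := by
  rw [PySem.Set.ofList_eq_foldl, PySem.Set.ofList_eq_foldl, List.foldl_append]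

theorem pv_loop_agree (num_nodes depot : Int) :
    ∀ (rs : List (List Int)) (cs : List Int), cs.Nodup →
      pvAFin num_nodes (pvALoop num_nodes depot rs (PySem.Set.ofList cs)) =
      pvMidFin num_nodes (pvMidLoop num_nodes depot rs cs) := by
  intro rs
  induction rs with
  | nil =>
    intro cs hnd
    simp only [pvALoop, pvMidLoop, pvAFin, pvMidFin, PySem.Set.ofList_eq_self_of_nodup cs hnd]
    by_cases he : PySem.Set.equal cs (PySem.Set.ofList (PySem.List.pyRange 1 num_nodes 1)) = true
    · have hperm : cs.Perm (PySem.Set.ofList (PySem.List.pyRange 1 num_nodes 1)) :=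
        (List.perm_ext_iff_of_nodup hnd (PySem.Set.nodup_ofList _)).2
          (fun a => ((PySem.Set.equal_iff _ _).1 he) a)
      simp [he, PySem.Set.len, hperm.length_eq]
    · simp [eq_false_of_ne_true he]
  | cons r rest ih =>
    intro cs hnd
    simp only [pvALoop, pvMidLoop]
    split_ifs with h1 h2 h3 h4
    · exact ih cs hnd
    · rfl
    · rfl
    · -- A fails its in-route duplicate check; the flat list is no longer duplicate-free
      have hknd : ¬ (List.filter (fun n => decide (n ≠ depot)) r).Nodup := fun hnk =>
        h4 (by rw [PySem.Set.ofList_eq_self_of_nodup _ hnk]; simp [PySem.Set.len])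
      exact (pv_midLoop_not_nodup num_nodes depot rest _
        (fun hnk => hknd (hnk.sublist (List.sublist_append_right cs _)))).symm
    · have hlen : (PySem.Set.ofList (List.filter (fun n => decide (n ≠ depot)) r)).length
          = (List.filter (fun n => decide (n ≠ depot)) r).length := by
        have h4' := not_ne_iff.1 h4
        simp only [PySem.Set.len] at h4'
        omega
      have hknd := pv_length_ofList_eq_iff_nodup.1 hlen
      rw [pv_innerLoop_eq _ _ hknd]
      by_cases hany : ∃ m ∈ List.filter (fun n => decide (n ≠ depot)) r, m ∈ PySem.Set.ofList cs
      · rw [if_pos hany]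
        obtain ⟨m, hmk, hmc⟩ := hany
        have hmcs : m ∈ cs := (PySem.Set.mem_ofList cs m).1 hmc
        refine (pv_midLoop_not_nodup num_nodes depot rest _ (fun hnk => ?_)).symm
        exact (List.disjoint_of_nodup_append hnk) hmcs hmk
      · rw [if_neg hany, pv_foldl_add_ofList]
        have hdisj : cs.Disjoint (List.filter (fun n => decide (n ≠ depot)) r) :=
          fun m hmc hmk => hany ⟨m, hmk, (PySem.Set.mem_ofList cs m).2 hmc⟩
        exact ih _ (hnd.append hknd hdisj)

-- B's structural checks over the remaining routes, as one Bool
def pvChecks (num_nodes depot : Int) (rs : List (List Int)) : Bool :=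
  (rs.filter (fun r => decide (r ≠ []))).all
      (fun r => (PySem.List.pyGetD r 0 0 == depot) && (PySem.List.pyGetD r (-1) 0 == depot)) &&
  (rs.filter (fun r => decide (r ≠ []))).all
      (fun r => r.all (fun n => decide (0 ≤ n) && decide (n < num_nodes)))

def pvFlat (depot : Int) (rs : List (List Int)) : List Int :=
  (rs.filter (fun r => decide (r ≠ []))).flatMap (fun r => r.filter (fun n => decide (n ≠ depot)))

theorem pv_midLoop_closed (num_nodes depot : Int) :
    ∀ (rs : List (List Int)) (cs : List Int),
      pvMidLoop num_nodes depot rs cs =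
        if pvChecks num_nodes depot rs = true then some (cs ++ pvFlat depot rs) else none := by
  intro rs
  induction rs with
  | nil => intro cs; simp [pvMidLoop, pvChecks, pvFlat]
  | cons r rest ih =>
    intro cs
    simp only [pvMidLoop]
    by_cases h1 : r = []
    · have hfc : List.filter (fun r => decide (r ≠ [])) (r :: rest)
          = List.filter (fun r => decide (r ≠ [])) rest := by
        simp [h1]
      have hc : pvChecks num_nodes depot (r :: rest) = pvChecks num_nodes depot rest := by
        unfold pvChecks; rw [hfc]
      have hf : pvFlat depot (r :: rest) = pvFlat depot rest := by
        unfold pvFlat; rw [hfc]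
      rw [if_pos h1, hc, hf]
      exact ih cs
    · have hfc : List.filter (fun r => decide (r ≠ [])) (r :: rest)
          = r :: List.filter (fun r => decide (r ≠ [])) rest := by
        simp [h1]
      rw [if_neg h1]
      by_cases h2 : PySem.List.pyGetD r 0 0 ≠ depot ∨ PySem.List.pyGetD r (-1) 0 ≠ depot
      · have he : ((PySem.List.pyGetD r 0 0 == depot) && (PySem.List.pyGetD r (-1) 0 == depot)) = false := by
          rcases h2 with h | h
          · simp [beq_eq_false_iff_ne.2 h]
          · simp [beq_eq_false_iff_ne.2 h]
        have hc : pvChecks num_nodes depot (r :: rest) = false := by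
          simp only [pvChecks, hfc, List.all_cons, he, Bool.false_and]
        rw [if_pos h2, hc]; simp
      · rw [if_neg h2]
        have h2' := not_or.1 h2
        have he : ((PySem.List.pyGetD r 0 0 == depot) && (PySem.List.pyGetD r (-1) 0 == depot)) = true := by
          simp [not_ne_iff.1 h2'.1, not_ne_iff.1 h2'.2]
        by_cases h3 : (r.any fun idx => decide (idx < 0) || decide (num_nodes ≤ idx)) = true
        · have hi : r.all (fun n => decide (0 ≤ n) && decide (n < num_nodes)) = false := by
            obtain ⟨n, hn, hv⟩ := List.any_eq_true.1 h3
            refine List.all_eq_false.2 ⟨n, hn, ?_⟩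
            simp only [Bool.or_eq_true, decide_eq_true_eq] at hv
            simp only [Bool.and_eq_true, decide_eq_true_eq, not_and, not_lt]
            omega
          have hc : pvChecks num_nodes depot (r :: rest) = false := by
            simp only [pvChecks, hfc, List.all_cons, hi, Bool.false_and, Bool.and_false]
          rw [if_pos h3, hc]; simp
        · have hi : r.all (fun n => decide (0 ≤ n) && decide (n < num_nodes)) = true := by
            rw [List.all_eq_true]
            intro n hn
            have hv : (decide (n < 0) || decide (num_nodes ≤ n)) = false := by
              have := List.any_eq_false.1 (eq_false_of_ne_true h3) n hn
              simpa using this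
            simp only [Bool.or_eq_false_iff, decide_eq_false_iff_not] at hv
            simp only [Bool.and_eq_true, decide_eq_true_eq]
            omega
          have hc : pvChecks num_nodes depot (r :: rest) = pvChecks num_nodes depot rest := by
            simp only [pvChecks, hfc, List.all_cons, he, hi, Bool.true_and]
          have hf : pvFlat depot (r :: rest) =
              List.filter (fun n => decide (n ≠ depot)) r ++ pvFlat depot rest := by
            simp only [pvFlat, hfc, List.flatMap_cons]
          rw [if_neg h3, ih, hc, hf, List.append_assoc]

theorem pv_fin_eq_sorted (num_nodes : Int) (cs : List Int) :
    pvMidFin num_nodes (some cs) =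
      (PySem.List.sorted cs (fun x => x) false == PySem.List.pyRange 1 num_nodes 1) := by
  have hrnd : (PySem.List.pyRange 1 num_nodes 1).Nodup := PySem.List.nodup_pyRange_one 1 num_nodes
  rw [Bool.eq_iff_iff]
  constructor
  · intro h
    simp only [pvMidFin, Bool.and_eq_true, beq_iff_eq] at h
    obtain ⟨hlen, he⟩ := h
    rw [PySem.Set.ofList_eq_self_of_nodup _ hrnd] at hlen he
    simp only [PySem.Set.len] at hlen
    have hperm : (PySem.Set.ofList cs).Perm (PySem.List.pyRange 1 num_nodes 1) :=
      (List.perm_ext_iff_of_nodup (PySem.Set.nodup_ofList cs) hrnd).2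
        (fun a => ((PySem.Set.equal_iff _ _).1 he) a)
    have hnd : cs.Nodup := by
      apply pv_length_ofList_eq_iff_nodup.1
      rw [hperm.length_eq]; omega
    have hcp : cs.Perm (PySem.List.pyRange 1 num_nodes 1) := by
      rw [PySem.Set.ofList_eq_self_of_nodup _ hnd] at hperm; exact hperm
    rw [PySem.List.sorted_eq_of_perm_of_pairwise_lt cs (PySem.List.pyRange 1 num_nodes 1)
      (fun x => x) hcp.symm (PySem.List.pairwise_lt_pyRange_one 1 num_nodes)]
    simp
  · intro h
    rw [beq_iff_eq] at h
    have hperm : cs.Perm (PySem.List.pyRange 1 num_nodes 1) :=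
      (h ▸ (PySem.List.sorted_perm cs (fun x => x) false)).symm
    have hnd : cs.Nodup := hperm.nodup_iff.2 hrnd
    simp only [pvMidFin, Bool.and_eq_true, beq_iff_eq]
    refine ⟨?_, ?_⟩
    · rw [PySem.Set.ofList_eq_self_of_nodup _ hrnd]
      simp only [PySem.Set.len]
      have := hperm.length_eq
      omega
    · apply (PySem.Set.equal_iff _ _).2
      intro a
      rw [PySem.Set.mem_ofList, PySem.Set.mem_ofList]
      exact hperm.mem_iff

-- ===== VERDICT =====
theorem check_cvrp_route_feasibility_spec : Claim_equal_check_cvrp_route_feasibility := by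
  intro routes num_nodes depot _
  unfold Spec_check_cvrp_route_feasibility
  by_cases hr : routes = []
  · simp [check_cvrp_route_feasibility, check_cvrp_route_feasibility_alt, hr]
  · have hA : check_cvrp_route_feasibility routes num_nodes depot =
        pvAFin num_nodes (pvALoop num_nodes depot routes PySem.Set.empty) := by
      unfold check_cvrp_route_feasibility
      rw [if_neg hr]
      cases pvALoop num_nodes depot routes PySem.Set.empty <;> rfl
    have h1 : pvAFin num_nodes (pvALoop num_nodes depot routes PySem.Set.empty) =
        pvMidFin num_nodes (pvMidLoop num_nodes depot routes []) :=
      pv_loop_agree num_nodes depot routes [] List.nodup_nil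
    have halt : check_cvrp_route_feasibility_alt routes num_nodes depot =
        (decide (routes ≠ []) && (pvChecks num_nodes depot routes &&
          (PySem.List.sorted (pvFlat depot routes) (fun x => x) false
            == PySem.List.pyRange 1 num_nodes 1))) := by
      simp [check_cvrp_route_feasibility_alt, pvChecks, pvFlat, Bool.and_assoc]
    rw [hA, h1, pv_midLoop_closed, halt]
    by_cases hc : pvChecks num_nodes depot routes = true
    · rw [if_pos hc, List.nil_append, pv_fin_eq_sorted]
      simp [hr, hc]
    · rw [if_neg hc]
      simp [pvMidFin, eq_false_of_ne_true hc]
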